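-- pv_equiv track=rewrite | github.com/pilshub/aoe4-replay-viewer | tools/analyze_classes.py | format_method_desc
-- ===== SOURCE A (Python) =====
-- def format_descriptor(desc):
--     """Convert Java type descriptor to human-readable form."""
--     mapping = {
--         'B': 'byte', 'C': 'char', 'D': 'double', 'F': 'float',
--         'I': 'int', 'J': 'long', 'S': 'short', 'Z': 'boolean', 'V': 'void'
--     }
--     if desc in mapping:
--         return mapping[desc]
--     if desc.startswith('['):
--         return format_descriptor(desc[1:]) + '[]'
--     if desc.startswith('L') and desc.endswith(';'):
--         return desc[1:-1].replace('/', '.')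
--     return desc
--
-- def format_method_desc(desc):
--     """Convert method descriptor to human-readable form."""
--     # Parse (params)return
--     if not desc.startswith('('):
--         return desc
--     close = desc.index(')')
--     params_str = desc[1:close]
--     ret_str = desc[close+1:]
--
--     params = []
--     i = 0
--     while i < len(params_str):
--         if params_str[i] in 'BCDFIJSZV':
--             params.append(format_descriptor(params_str[i]))
--             i += 1
--         elif params_str[i] == '[':
--             j = i
--             while params_str[j] == '[':
--                 j += 1
--             if params_str[j] == 'L':
--                 end = params_str.index(';', j)
--                 params.append(format_descriptor(params_str[i:end+1]))
--                 i = end + 1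
--             else:
--                 params.append(format_descriptor(params_str[i:j+1]))
--                 i = j + 1
--         elif params_str[i] == 'L':
--             end = params_str.index(';', i)
--             params.append(format_descriptor(params_str[i:end+1]))
--             i = end + 1
--         else:
--             i += 1
--
--     ret = format_descriptor(ret_str)
--     return f"({', '.join(params)}) -> {ret}"
-- ===== SOURCE B (Python) =====
-- PRIMS = {'B': 'byte', 'C': 'char', 'D': 'double', 'F': 'float',
--          'I': 'int', 'J': 'long', 'S': 'short', 'Z': 'boolean', 'V': 'void'}
--
--
-- def format_descriptor(desc):
--     """Strip the leading '[' run, name the base once, append '[]' per dimension."""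
--     dims = len(desc) - len(desc.lstrip('['))
--     base = desc[dims:]
--     if base in PRIMS:
--         name = PRIMS[base]
--     elif base.startswith('L') and base.endswith(';'):
--         name = base[1:-1].replace('/', '.')
--     else:
--         name = base
--     return name + '[]' * dims
--
--
-- def format_method_desc(desc):
--     """Single-pass character state machine over the parameter section."""
--     if not desc.startswith('('):
--         return desc
--     close = desc.index(')')
--     out = []
--     dims = 0          # pending array dimensions
--     cls = None        # class-name buffer while inside an 'L...;' descriptor
--     for c in desc[1:close]:
--         if cls is not None:
--             if c == ';':
--                 out.append(cls.replace('/', '.') + '[]' * dims)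
--                 cls, dims = None, 0
--             else:
--                 cls += c
--         elif c == '[':
--             dims += 1
--         elif c == 'L':
--             cls = ''
--         elif c in PRIMS:
--             out.append(PRIMS[c] + '[]' * dims)
--             dims = 0
--         elif dims:
--             out.append(c + '[]' * dims)
--             dims = 0
--     return f"({', '.join(out)}) -> {format_descriptor(desc[close + 1:])}"
-- ===== Notes on version B (the rewrite author's own statement) =====
-- stated objective: alternative
-- what changed: A's token-oriented loop (three branches that each slice out a whole field descriptor and hand it to a recursive format_descriptor) is replaced by a single-pass character-level state machine over the parameter section, carrying a pending-dimension counter and an optional class-name buffer and emitting each formatted parameter directly, with a non-recursive lstrip-based format_descriptor used only for the return type.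
import Mathlib
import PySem

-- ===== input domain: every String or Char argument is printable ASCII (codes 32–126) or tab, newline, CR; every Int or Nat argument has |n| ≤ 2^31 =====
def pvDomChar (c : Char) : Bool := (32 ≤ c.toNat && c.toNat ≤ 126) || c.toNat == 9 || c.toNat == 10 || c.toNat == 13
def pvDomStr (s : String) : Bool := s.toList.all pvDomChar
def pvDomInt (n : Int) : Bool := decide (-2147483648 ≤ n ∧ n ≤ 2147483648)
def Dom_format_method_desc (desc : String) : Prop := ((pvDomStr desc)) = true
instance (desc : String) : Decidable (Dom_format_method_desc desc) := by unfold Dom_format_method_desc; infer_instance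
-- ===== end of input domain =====

-- B replaces A's token-slicing loop (three branches, each cutting out a whole field
-- descriptor and recursively formatting it) by a single-pass character-level state machine
-- over the parameter section (alternative decomposition, same behaviour).

-- ===== PORT A =====
-- the primitive descriptor letters of the string 'BCDFIJSZV'
def primsA : List Char := ['B', 'C', 'D', 'F', 'I', 'J', 'S', 'Z', 'V']

-- A's recursive format_descriptor: dict of singletons, '[' recursion, then the L…; class form
def fdA (cs : List Char) : String :=
  if cs = ['B'] then "byte"
  else if cs = ['C'] then "char"
  else if cs = ['D'] then "double"
  else if cs = ['F'] then "float"
  else if cs = ['I'] then "int"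
  else if cs = ['J'] then "long"
  else if cs = ['S'] then "short"
  else if cs = ['Z'] then "boolean"
  else if cs = ['V'] then "void"
  else match cs with
    | '[' :: rest => fdA rest ++ "[]"
    | _ =>
      if cs.head? = some 'L' ∧ cs.getLast? = some ';' then
        -- desc[1:-1].replace('/', '.'); map is exact for a single-char pattern
        String.ofList ((cs.drop 1).dropLast.map (fun c => if c = '/' then '.' else c))
      else String.ofList cs

-- A's while loop over params_str; fuel = |params_str| (each step consumes ≥ 1 char)
def loopA (fuel : Nat) (cs : List Char) (acc : List String) : List String :=
  match fuel with
  | 0 => acc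
  | fuel + 1 =>
    match cs with
    | [] => acc
    | c :: rest =>
      if primsA.contains c then loopA fuel rest (acc ++ [fdA [c]])
      else if c = '[' then
        -- j scans the '[' run; params_str[i:j+1] / params_str[i:end+1] are the slices below
        match (c :: rest).drop (((c :: rest).takeWhile (· = '[')).length) with
        | [] => acc  -- Python raises IndexError here (bracket run hits the end); outside Pre_
        | b :: bRest =>
          if b = 'L' then
            if ';' ∈ bRest then
              loopA fuel (bRest.drop ((bRest.takeWhile (· ≠ ';')).length + 1))
                (acc ++ [fdA ((c :: rest).takeWhile (· = '[')
                  ++ 'L' :: (bRest.take ((bRest.takeWhile (· ≠ ';')).length) ++ [';']))])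
            else acc  -- Python raises ValueError (no ';'); outside Pre_
          else loopA fuel bRest (acc ++ [fdA ((c :: rest).takeWhile (· = '[') ++ [b])])
      else if c = 'L' then
        if ';' ∈ rest then
          loopA fuel (rest.drop ((rest.takeWhile (· ≠ ';')).length + 1))
            (acc ++ [fdA ('L' :: (rest.take ((rest.takeWhile (· ≠ ';')).length) ++ [';']))])
        else acc  -- Python raises ValueError (no ';'); outside Pre_
      else loopA fuel rest acc

def format_method_desc (desc : String) : String :=
  if desc.toList.head? = some '(' then
    match desc.toList.findIdx? (· = ')') with
    | none => desc  -- Python raises ValueError (desc.index(')')); outside Pre_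
    | some close =>
      "(" ++ String.intercalate ", "
          (loopA ((desc.toList.take close).drop 1).length ((desc.toList.take close).drop 1) [])
        ++ ") -> " ++ fdA (desc.toList.drop (close + 1))
  else desc

-- ===== PORT B =====
-- '[]' * dims
def bracketsB : Nat → String
  | 0 => ""
  | n + 1 => bracketsB n ++ "[]"

-- the character replacement of .replace('/', '.')
def replB (c : Char) : Char := if c = '/' then '.' else c

-- the PRIMS dict lookup, as an if-chain
def primB (c : Char) : Option String :=
  if c = 'B' then some "byte"
  else if c = 'C' then some "char"
  else if c = 'D' then some "double"
  else if c = 'F' then some "float"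
  else if c = 'I' then some "int"
  else if c = 'J' then some "long"
  else if c = 'S' then some "short"
  else if c = 'Z' then some "boolean"
  else if c = 'V' then some "void"
  else none

-- the base-naming part of B's format_descriptor ('base in PRIMS' / 'L…;' / raw)
def fallbackB (base : List Char) : String :=
  if base.head? = some 'L' ∧ base.getLast? = some ';' then
    String.ofList ((base.drop 1).dropLast.map replB)
  else String.ofList base

def nameB (base : List Char) : String :=
  match base with
  | [c] =>
    match primB c with
    | some n => n
    | none => fallbackB base
  | _ => fallbackB base

-- B's non-recursive format_descriptor: lstrip the '[' run, name the base, append '[]' per dim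
def fdB (cs : List Char) : String :=
  let dims := (cs.takeWhile (· = '[')).length
  nameB (cs.drop dims) ++ bracketsB dims

-- B's character state machine: pending dimension counter + optional class-name buffer
def loopB : List Char → Nat → Option (List Char) → List String → List String
  | [], _, _, out => out
  | c :: rest, dims, some buf, out =>
    if c = ';' then
      loopB rest 0 none (out ++ [String.ofList (buf.map replB) ++ bracketsB dims])
    else loopB rest dims (some (buf ++ [c])) out
  | c :: rest, dims, none, out =>
    if c = '[' then loopB rest (dims + 1) none out
    else if c = 'L' then loopB rest dims (some []) out
    else
      match primB c with
      | some n => loopB rest 0 none (out ++ [n ++ bracketsB dims])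
      | none =>
        if dims ≠ 0 then loopB rest 0 none (out ++ [String.ofList [c] ++ bracketsB dims])
        else loopB rest 0 none out

def format_method_desc_alt (desc : String) : String :=
  if desc.toList.head? = some '(' then
    match desc.toList.findIdx? (· = ')') with
    | none => desc  -- Python raises ValueError (desc.index(')')); outside Pre_
    | some close =>
      "(" ++ String.intercalate ", " (loopB ((desc.toList.take close).drop 1) 0 none [])
        ++ ") -> " ++ fdB (desc.toList.drop (close + 1))
  else desc

-- ===== PRECONDITION & SPEC =====
-- Pre_ excludes exactly the inputs on which A raises: a '(' descriptor with no ')' (ValueError),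
-- or whose parameter section's final ';'-free tail contains an 'L' (missing ';' → ValueError)
-- or ends in '[' (bracket run hits the end → IndexError).
def Pre_format_method_desc (desc : String) : Prop :=
  desc.toList.head? = some '(' →
    (')' ∈ desc.toList ∧
     'L' ∉ (((desc.toList.drop 1).takeWhile (· ≠ ')')).reverse.takeWhile (· ≠ ';')) ∧
     ((((desc.toList.drop 1).takeWhile (· ≠ ')')).reverse.takeWhile (· ≠ ';')).head? ≠ some '['))
instance (desc : String) : Decidable (Pre_format_method_desc desc) := by
  unfold Pre_format_method_desc; infer_instance
def pvWitness_format_method_desc : String := "(I[Ljava/lang/String;)V"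
def Spec_format_method_desc (desc : String) (out : String) : Prop := out = format_method_desc_alt desc
instance (desc : String) (out : String) : Decidable (Spec_format_method_desc desc out) := by
  unfold Spec_format_method_desc; infer_instance

-- ===== CLAIM (what is proved, stated in full; the proofs are below) =====
def Claim_equal_format_method_desc : Prop := ∀ (desc : String), Dom_format_method_desc desc → Pre_format_method_desc desc → Spec_format_method_desc desc (format_method_desc desc)

-- ===== LEMMAS AND PROOFS =====
theorem fdB_bracket (cs : List Char) : fdB ('[' :: cs) = fdB cs ++ "[]" := by
  simp only [fdB, List.takeWhile_cons, decide_eq_true_eq, if_pos, List.length_cons,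
    List.drop_succ_cons, bracketsB, String.append_assoc]

theorem nameB_chain (base : List Char) :
    nameB base =
      if base = ['B'] then "byte"
      else if base = ['C'] then "char"
      else if base = ['D'] then "double"
      else if base = ['F'] then "float"
      else if base = ['I'] then "int"
      else if base = ['J'] then "long"
      else if base = ['S'] then "short"
      else if base = ['Z'] then "boolean"
      else if base = ['V'] then "void"
      else fallbackB base := by
  match base with
  | [] => decide
  | [c] =>
    simp only [nameB, primB, List.cons.injEq, and_true]
    split_ifs <;> simp_all
  | c :: d :: rest =>
    have h : ∀ x : Char, c :: d :: rest ≠ [x] := by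
      intro x h; injection h with _ h2; exact (List.cons_ne_nil _ _) h2
    simp only [nameB, h, if_false]

theorem takeWhile_nil_of_head {p : Char → Bool} (cs : List Char)
    (h : ∀ c, cs.head? = some c → p c = false) : cs.takeWhile p = [] := by
  cases cs with
  | nil => rfl
  | cons c rest => simp [h c rfl]

theorem fdB_flat (cs : List Char) (h : cs.head? ≠ some '[') : fdB cs = nameB cs := by
  have ht : cs.takeWhile (· = '[') = [] := by
    apply takeWhile_nil_of_head
    intro c hc
    simp only [decide_eq_false_iff_not]
    intro hcb; exact h (by rw [hc, hcb])
  simp [fdB, ht, bracketsB]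

theorem fd_eq (cs : List Char) : fdA cs = fdB cs := by
  induction cs with
  | nil => decide
  | cons c rest ih =>
    by_cases hc : c = '['
    · subst hc
      rw [fdB_bracket, ← ih, fdA]; simp
    · rw [fdB_flat _ (by simp [hc]), nameB_chain, fdA, fallbackB]
      congr 1
      intro r h
      injection h with h1 _
      exact hc h1

theorem takeWhile_replicate_append (n : Nat) (base : List Char) (h : base.head? ≠ some '[') :
    (List.replicate n '[' ++ base).takeWhile (· = '[') = List.replicate n '[' := by
  induction n with
  | zero =>
    simp only [List.replicate, List.nil_append]
    apply takeWhile_nil_of_head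
    intro c hc
    simp only [decide_eq_false_iff_not]
    intro hcb; exact h (by rw [hc, hcb])
  | succ n ih => simp [List.replicate_succ, ih]

theorem fdB_repl (n : Nat) (base : List Char) (h : base.head? ≠ some '[') :
    fdB (List.replicate n '[' ++ base) = nameB base ++ bracketsB n := by
  simp [fdB, takeWhile_replicate_append n base h]

theorem nameB_class (pre : List Char) :
    nameB ('L' :: (pre ++ [';'])) = String.ofList (pre.map replB) := by
  cases pre with
  | nil => decide
  | cons p ps =>
    rw [List.cons_append]
    have h2 : ∀ x : Char, ('L' :: p :: (ps ++ [';'])) ≠ [x] := by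
      intro x h; injection h with _ h2; exact (List.cons_ne_nil _ _) h2
    simp only [nameB, fallbackB]
    have hcond : ('L' :: p :: (ps ++ [';'])).head? = some 'L'
        ∧ ('L' :: p :: (ps ++ [';'])).getLast? = some ';' := by
      refine ⟨rfl, ?_⟩
      rw [show ('L' :: p :: (ps ++ [';'])) = ('L' :: p :: ps) ++ [';'] by simp]
      exact List.getLast?_concat
    rw [if_pos hcond]
    have hdl : (List.drop 1 ('L' :: p :: (ps ++ [';']))).dropLast = p :: ps :=
      List.dropLast_concat (l₁ := p :: ps) (b := ';')
    rw [hdl]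

theorem loopB_replicate (n : Nat) : ∀ (rest : List Char) (dims : Nat) (out : List String),
    loopB (List.replicate n '[' ++ rest) dims none out = loopB rest (dims + n) none out := by
  induction n with
  | zero => intro rest dims out; simp
  | succ n ih =>
    intro rest dims out
    rw [List.replicate_succ, List.cons_append, loopB, if_pos rfl, ih]
    have h' : dims + 1 + n = dims + (n + 1) := by omega
    rw [h']

theorem loopB_noSemi : ∀ (pre : List Char), ';' ∉ pre →
    ∀ (dims : Nat) (buf : List Char) (out : List String),
      loopB pre dims (some buf) out = out := by
  intro pre
  induction pre with
  | nil => intro _ dims buf out; rfl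
  | cons c rest ih =>
    intro h dims buf out
    have hc : ¬ c = ';' := fun hcc => h (by simp [hcc])
    rw [loopB, if_neg hc]
    exact ih (fun hm => h (List.mem_cons_of_mem _ hm)) _ _ _

theorem loopB_class : ∀ (pre : List Char), ';' ∉ pre →
    ∀ (rest : List Char) (dims : Nat) (buf : List Char) (out : List String),
      loopB (pre ++ ';' :: rest) dims (some buf) out
        = loopB rest 0 none (out ++ [String.ofList ((buf ++ pre).map replB) ++ bracketsB dims]) := by
  intro pre
  induction pre with
  | nil => intro _ rest dims buf out; rw [List.nil_append, loopB, if_pos rfl]; simp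
  | cons c pre ih =>
    intro h rest dims buf out
    have hc : ¬ c = ';' := fun hcc => h (by simp [hcc])
    rw [List.cons_append, loopB, if_neg hc, ih (fun hm => h (List.mem_cons_of_mem _ hm))]
    simp

theorem split_semi : ∀ (l : List Char), ';' ∈ l →
    l = l.takeWhile (· ≠ ';') ++ ';' :: l.drop ((l.takeWhile (· ≠ ';')).length + 1) := by
  intro l
  induction l with
  | nil => intro h; cases h
  | cons c rest ih =>
    intro hl
    by_cases hc : c = ';'
    · subst hc; simp
    · have hr : ';' ∈ rest := by
        rcases List.mem_cons.mp hl with h1 | h1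
        · exact absurd h1.symm hc
        · exact h1
      have := ih hr
      simp only [List.takeWhile_cons, decide_eq_true_eq]
      rw [if_pos (by simpa using hc)]
      simp only [List.length_cons, List.cons_append, List.drop_succ_cons]
      exact congrArg (c :: ·) this

theorem not_semi_takeWhile (l : List Char) : ';' ∉ l.takeWhile (· ≠ ';') := by
  intro h
  have := List.mem_takeWhile_imp h
  simp at this

theorem take_takeWhile (l : List Char) (p : Char → Bool) :
    l.take ((l.takeWhile p).length) = l.takeWhile p := by
  exact (List.prefix_iff_eq_take.mp (List.takeWhile_prefix p)).symm

theorem dropWhile_head_false {p : Char → Bool} : ∀ (l : List Char) (b : Char) (bs : List Char),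
    l.dropWhile p = b :: bs → p b = false := by
  intro l
  induction l with
  | nil => intro b bs h; cases h
  | cons c rest ih =>
    intro b bs h
    rw [List.dropWhile_cons] at h
    by_cases hp : p c
    · rw [if_pos hp] at h; exact ih _ _ h
    · rw [if_neg hp] at h
      injection h with h1 _
      rw [← h1]
      simpa using hp

theorem primB_none (c : Char) (h : ¬ c ∈ primsA) : primB c = none := by
  rw [primB]
  split_ifs with h1 h2 h3 h4 h5 h6 h7 h8 h9 <;>
    first
      | rfl
      | (exfalso; apply h; simp [primsA]; tauto)

theorem drop_length_takeWhile (l : List Char) (p : Char → Bool) :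
    l.drop ((l.takeWhile p).length) = l.dropWhile p := by
  induction l with
  | nil => rfl
  | cons c rest ih =>
    rw [List.takeWhile_cons, List.dropWhile_cons]
    by_cases hp : p c <;> simp [hp, ih]

theorem loopB_step_L (r : List Char) (dims : Nat) (out : List String) :
    loopB ('L' :: r) dims none out = loopB r dims (some []) out := by
  rw [loopB, if_neg (by decide : ¬ ('L' : Char) = '['), if_pos rfl]

theorem loopB_step_other (b : Char) (r : List Char) (dims : Nat) (out : List String)
    (hb : ¬ b = '[') (hbl : ¬ b = 'L') :
    loopB (b :: r) dims none out =
      match primB b with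
      | some nm => loopB r 0 none (out ++ [nm ++ bracketsB dims])
      | none =>
        if dims ≠ 0 then loopB r 0 none (out ++ [String.ofList [b] ++ bracketsB dims])
        else loopB r 0 none out := by
  rw [loopB, if_neg hb, if_neg hbl]

theorem loop_eq (fuel : Nat) : ∀ (cs : List Char) (acc : List String), cs.length ≤ fuel →
    loopA fuel cs acc = loopB cs 0 none acc := by
  induction fuel with
  | zero =>
    intro cs acc h
    have : cs = [] := List.length_eq_zero_iff.mp (Nat.le_zero.mp h)
    subst this; rfl
  | succ fuel ih =>
    intro cs acc hlen
    cases cs with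
    | nil => rfl
    | cons c rest =>
      simp only [List.length_cons, Nat.add_le_add_iff_right] at hlen
      by_cases hp : primsA.contains c
      · have hmem : c ∈ primsA := by simpa using hp
        fin_cases hmem <;>
          · rw [loopA]
            simp [loopB, primB, fdA, bracketsB, primsA, ih _ _ hlen]
      · have hpc : ¬ (primsA.contains c = true) := hp
        by_cases hc : c = '['
        · subst hc
          rw [loopA, if_neg hpc, if_pos rfl]
          have hdrop : ('[' :: rest).drop ((('[' :: rest).takeWhile (· = '[')).length)
              = ('[' :: rest).dropWhile (· = '[') := drop_length_takeWhile _ _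
          have hrepl : ('[' :: rest).takeWhile (· = '[')
              = List.replicate ((('[' :: rest).takeWhile (· = '[')).length) '[' := by
            apply List.eq_replicate_of_mem
            intro b hb
            have := List.mem_takeWhile_imp hb
            simpa using this
          set n := (('[' :: rest).takeWhile (· = '[')).length with hn
          have hn1 : 1 ≤ n := by
            rw [hn]; simp
          have hsplit : '[' :: rest
              = List.replicate n '[' ++ ('[' :: rest).dropWhile (· = '[') := by
            conv_lhs => rw [← List.takeWhile_append_dropWhile (p := (· = '[')) (l := '[' :: rest)]
            rw [← hrepl]
          have hlen2 : (('[' :: rest).dropWhile (· = '[')).length + n = rest.length + 1 := by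
            have h' := congrArg List.length hsplit
            rw [List.length_cons, List.length_append, List.length_replicate] at h'
            omega
          rw [hdrop]
          rcases hdw : ('[' :: rest).dropWhile (· = '[') with _ | ⟨b, bRest⟩
          · -- bracket run to the end: A bails (IndexError), B consumes the run and stops
            simp only []
            conv_rhs => rw [hsplit, hdw]
            rw [loopB_replicate]
            rfl
          · have hb : ¬ b = '[' := by
              have := dropWhile_head_false _ _ _ hdw
              simpa using this
            simp only []
            conv_rhs => rw [hsplit, hdw, loopB_replicate]
            have hlb : bRest.length + 1 + n = rest.length + 1 := by
              rw [← hlen2, hdw]; simp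
            by_cases hbl : b = 'L'
            · subst hbl
              rw [if_pos rfl, loopB_step_L]
              by_cases hs : ';' ∈ bRest
              · rw [if_pos hs]
                set pre := bRest.takeWhile (· ≠ ';') with hpre
                set post := bRest.drop (pre.length + 1) with hpost
                have hsp : bRest = pre ++ ';' :: post := split_semi bRest hs
                conv_rhs => rw [hsp]
                rw [loopB_class pre (hpre ▸ not_semi_takeWhile bRest)]
                have htk : bRest.take pre.length = pre := hpre ▸ take_takeWhile bRest _
                rw [htk]
                have hfd : fdA (('[' :: rest).takeWhile (· = '[') ++ 'L' :: (pre ++ [';']))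
                    = String.ofList (pre.map replB) ++ bracketsB n := by
                  rw [fd_eq, hrepl, fdB_repl n _ (by simp), nameB_class]
                rw [hfd]
                have hpl : post.length ≤ fuel := by
                  have := congrArg List.length hsp
                  simp at this
                  omega
                rw [ih _ _ hpl]
                simp
              · rw [if_neg hs, loopB_noSemi bRest hs]
            · rw [if_neg hbl, loopB_step_other b bRest (0 + n) acc hb hbl]
              have hfd : fdA (('[' :: rest).takeWhile (· = '[') ++ [b])
                  = nameB [b] ++ bracketsB n := by
                rw [fd_eq, hrepl, fdB_repl n _ (by simp [hb])]
              rw [hfd]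
              rcases hpb : primB b with _ | nm
              · simp only []
                rw [if_pos (by omega : 0 + n ≠ 0)]
                have hnb : nameB [b] = String.ofList [b] := by
                  simp only [nameB, hpb, fallbackB]
                  rw [if_neg (by simp [hbl])]
                rw [hnb, ih _ _ (by omega)]
                simp
              · simp only []
                have hnb : nameB [b] = nm := by simp [nameB, hpb]
                rw [hnb, ih _ _ (by omega)]
                simp
        · by_cases hL : c = 'L'
          · subst hL
            rw [loopA, if_neg hpc, if_neg hc, if_pos rfl, loopB,
              if_neg hc, if_pos rfl]
            by_cases hs : ';' ∈ rest
            · rw [if_pos hs]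
              set pre := rest.takeWhile (· ≠ ';') with hpre
              set post := rest.drop (pre.length + 1) with hpost
              have hsp : rest = pre ++ ';' :: post := split_semi rest hs
              conv_rhs => rw [hsp]
              rw [loopB_class pre (hpre ▸ not_semi_takeWhile rest)]
              have htk : rest.take pre.length = pre := hpre ▸ take_takeWhile rest _
              rw [htk]
              have hfd : fdA ('L' :: (pre ++ [';']))
                  = String.ofList (pre.map replB) ++ bracketsB 0 := by
                have h0 : fdB (List.replicate 0 '[' ++ ('L' :: (pre ++ [';'])))
                    = nameB ('L' :: (pre ++ [';'])) ++ bracketsB 0 :=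
                  fdB_repl 0 _ (by simp)
                simp only [List.replicate, List.nil_append] at h0
                rw [fd_eq, h0, nameB_class]
              rw [hfd]
              have hpl : post.length ≤ fuel := by
                have := congrArg List.length hsp
                simp at this
                omega
              rw [ih _ _ hpl]
              simp
            · rw [if_neg hs, loopB_noSemi rest hs]
          · rw [loopA, if_neg hpc, if_neg hc, if_neg hL, loopB,
              if_neg hc, if_neg hL, primB_none c (by simpa using hp)]
            rw [if_neg (by omega : ¬ (0 : Nat) ≠ 0)]
            exact ih _ _ hlen

theorem ports_eq (desc : String) : format_method_desc desc = format_method_desc_alt desc := by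
  unfold format_method_desc format_method_desc_alt
  by_cases h : desc.toList.head? = some '('
  · rcases hf : desc.toList.findIdx? (· = ')') with _ | close
    · simp [h]
    · simp only [h]
      rw [loop_eq _ _ _ (le_refl _), fd_eq]
  · simp [h]

-- ===== VERDICT (by name: the statement is the Claim_ definition above) =====
theorem format_method_desc_spec : Claim_equal_format_method_desc := by
  intro desc _ _
  exact ports_eq desc
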